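-- pv_equiv track=rewrite | github.com/pleielp/apss-py | chapter11/KAKURO2/sunghwan.py | get_candidate_nums
-- ===== SOURCE A (Python) =====
-- def get_mask_size(mask):
--     return (mask & 1) + get_mask_size(mask >> 1) if mask else 0
--
-- def get_mask_sum(mask):
--     ret = 0
--     i = 1
--
--     mask >>= 1
--     while mask:
--         if mask & 1:
--             ret += i
--         i += 1
--         mask >>= 1
--
--     return ret
--
-- def get_candidate_nums(_len, _sum, known):
--     all_sets = 0
--
--     for subset in range(0, 2 ** 10, 2):
--         if (subset & known) == known \
--            and get_mask_size(subset) == _len \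
--            and get_mask_sum(subset) == _sum:
--             all_sets |= subset
--
--     return all_sets & ~known
-- ===== SOURCE B (Python) =====
-- def _combos(start, k):
--     # all k-element digit sets drawn from {start..9}, as (bitmask, digit-sum) pairs
--     if k == 0:
--         return [(0, 0)]
--     res = []
--     for d in range(start, 10):
--         for mask, s in _combos(d + 1, k - 1):
--             res.append((mask | (1 << d), s + d))
--     return res
--
-- def get_candidate_nums(_len, _sum, known):
--     if _len < 0 or _len > 9:
--         return 0
--     acc = 0
--     for mask, s in _combos(1, _len):
--         if s == _sum and (mask & known) == known:
--             acc |= mask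
--     return acc & ~known
-- ===== Notes on version B (the rewrite author's own statement) =====
-- stated objective: alternative
-- what changed: Instead of scanning all 512 even bitmasks and filtering each by a recursive popcount and bit-sum, B recursively enumerates exactly the _len-element digit subsets of {1..9} together with their bitmask and digit sum, ORs the matching masks and clears the known bits.
import Mathlib
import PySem

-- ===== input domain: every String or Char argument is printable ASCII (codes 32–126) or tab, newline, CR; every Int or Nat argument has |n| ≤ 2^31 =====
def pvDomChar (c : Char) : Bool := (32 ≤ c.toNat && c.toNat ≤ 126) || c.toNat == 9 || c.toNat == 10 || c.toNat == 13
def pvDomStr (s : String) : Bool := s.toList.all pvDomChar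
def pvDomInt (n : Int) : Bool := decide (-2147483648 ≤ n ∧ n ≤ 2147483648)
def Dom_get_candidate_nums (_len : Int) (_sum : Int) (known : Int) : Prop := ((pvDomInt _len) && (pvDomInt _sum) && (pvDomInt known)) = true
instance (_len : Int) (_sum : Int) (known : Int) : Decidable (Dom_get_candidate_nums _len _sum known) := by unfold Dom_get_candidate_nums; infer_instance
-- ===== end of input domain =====

-- B replaces A's scan of all 512 even bitmasks (filtered by popcount/bit-sum) with a direct
-- recursive enumeration of the _len-element digit subsets of {1..9} (an 'alternative' objective).

-- ===== PORT A =====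
-- A's helpers are only ever called on the nonnegative loop values `range(0, 2**10, 2)`,
-- so they are ported over Nat (exact there; on a negative int the Python recursion/loop
-- would not terminate anyway).
-- structural recursion on a fuel bounded by `mask` itself (mask >>> 1 < mask whenever the
-- guard holds, so the fuel never runs out); this keeps the definition kernel-reducible
def get_mask_sizeGo : Nat → Nat → Nat
  | 0, _ => 0
  | fuel + 1, mask => if mask ≠ 0 then (mask &&& 1) + get_mask_sizeGo fuel (mask >>> 1) else 0

def get_mask_size (mask : Nat) : Nat := get_mask_sizeGo mask mask

-- the while-loop of get_mask_sum, state (mask, i, ret)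
def get_mask_sum_loop : Nat → Nat → Nat → Nat → Nat
  | 0, _, _, ret => ret
  | fuel + 1, mask, i, ret =>
      if mask ≠ 0 then
        get_mask_sum_loop fuel (mask >>> 1) (i + 1) (if mask &&& 1 = 1 then ret + i else ret)
      else ret

def get_mask_sum (mask : Nat) : Nat := get_mask_sum_loop mask (mask >>> 1) 1 0

-- all_sets is the fold accumulator; `return all_sets & ~known`
def get_candidate_nums (_len : Int) (_sum : Int) (known : Int) : Int :=
  PySem.Int.band
    ((PySem.List.pyRange 0 1024 2).foldl
      (fun all_sets subset =>
        if PySem.Int.band subset known == known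
            && ((get_mask_size subset.toNat : Int) == _len)
            && ((get_mask_sum subset.toNat : Int) == _sum)
        then PySem.Int.bor all_sets subset
        else all_sets) 0)
    (Int.not known)

-- ===== PORT B =====
-- Source B's _combos(start, k): k-element digit sets from {start..9} as (bitmask, digit-sum)
-- pairs; masks and sums are nonnegative, so they live in Nat (cast to Int at the comparisons).
def combosB (start : Nat) (k : Nat) : List (Nat × Nat) :=
  match k with
  | 0 => [(0, 0)]
  | Nat.succ k' =>
      (List.range' start (10 - start)).flatMap
        (fun d => (combosB (d + 1) k').map (fun ms => (ms.1 ||| (1 <<< d), ms.2 + d)))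

-- acc is the fold accumulator; `return acc & ~known`
def get_candidate_nums_alt (_len : Int) (_sum : Int) (known : Int) : Int :=
  if _len < 0 ∨ 9 < _len then 0
  else
    PySem.Int.band
      ((combosB 1 _len.toNat).foldl
        (fun acc ms =>
          if ((ms.2 : Int) == _sum) && (PySem.Int.band (ms.1 : Int) known == known)
          then PySem.Int.bor acc (ms.1 : Int)
          else acc) 0)
      (Int.not known)

-- ===== PRECONDITION & SPEC =====
def Spec_get_candidate_nums (_len : Int) (_sum : Int) (known : Int) (out : Int) : Prop := out = get_candidate_nums_alt _len _sum known
instance (_len : Int) (_sum : Int) (known : Int) (out : Int) : Decidable (Spec_get_candidate_nums _len _sum known out) := by unfold Spec_get_candidate_nums; infer_instance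

-- ===== CLAIM (what is proved, stated in full; the proofs are below) =====
def Claim_equal_get_candidate_nums : Prop := ∀ (_len : Int) (_sum : Int) (known : Int), Dom_get_candidate_nums _len _sum known → Spec_get_candidate_nums _len _sum known (get_candidate_nums _len _sum known)

-- ===== LEMMAS AND PROOFS =====

-- the Nat masks behind A's loop list
def maskListA : List Nat := (List.range 512).map (fun t => 2 * t)

set_option maxRecDepth 100000 in
theorem pyRange_eq_maskListA :
    PySem.List.pyRange 0 1024 2 = maskListA.map (fun (m : Nat) => (m : Int)) := by decide

-- every mask in A's list has popcount ≤ 9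
set_option maxRecDepth 100000 in
theorem maskListA_size_le : maskListA.all (fun m => get_mask_size m ≤ 9) = true := by decide

-- (↑a == ↑b : Bool) over Int
theorem natCast_beq (a b : Nat) : (((a : Int)) == ((b : Int))) = (a == b) := by
  by_cases h : a = b <;> simp [h]

-- a fold that never fires returns its seed
theorem foldl_id {α β : Type} (l : List α) (a : β) :
    l.foldl (fun a _ => a) a = a := by
  induction l generalizing a with
  | nil => rfl
  | cons x xs ih => simpa using ih a

-- cast an Int or-accumulating fold down to Nat
theorem foldl_bor_cast {α : Type} (l : List α) (c : α → Bool) (g : α → Nat) (aN : Nat) :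
    l.foldl (fun (a : Int) x => if c x then PySem.Int.bor a ((g x : Nat) : Int) else a) (aN : Int)
      = ((l.foldl (fun (n : Nat) x => if c x then n ||| g x else n) aN : Nat) : Int) := by
  induction l generalizing aN with
  | nil => rfl
  | cons x xs ih =>
      cases h : c x
      · have h1 : (if c x = true then PySem.Int.bor (aN : Int) ((g x : Nat) : Int) else (aN : Int))
            = ((aN : Int)) := by simp [h]
        have h2 : (if c x = true then aN ||| g x else aN) = aN := by simp [h]
        simp only [List.foldl_cons]
        rw [h1, h2]
        exact ih _
      · have h1 : (if c x = true then PySem.Int.bor (aN : Int) ((g x : Nat) : Int) else (aN : Int))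
            = (((aN ||| g x : Nat) : Int)) := by simp [h, PySem.Int.bor_natCast]
        have h2 : (if c x = true then aN ||| g x else aN) = aN ||| g x := by simp [h]
        simp only [List.foldl_cons]
        rw [h1, h2]
        exact ih _

-- A's filtered mask list, paired with its bit-sums, for popcount L
def pairsAList (L : Nat) : List (Nat × Nat) :=
  (maskListA.filter (fun m => get_mask_size m == L)).map (fun m => (m, get_mask_sum m))

-- A's per-popcount pairs are a permutation of B's combination list (checked for each L ≤ 9)
set_option maxRecDepth 100000 in
set_option maxHeartbeats 2000000 in
theorem pairsA_perm_combos (L : Nat) (hL : L ≤ 9) : (pairsAList L).Perm (combosB 1 L) := by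
  interval_cases L <;> decide

-- splitting A's Nat fold along the popcount test
theorem fold_split (q : Nat × Nat → Bool) (L : Nat) (l : List Nat) (a : Nat) :
    l.foldl (fun n m => if (q (m, get_mask_sum m) && (get_mask_size m == L)) then n ||| m else n) a
      = ((l.filter (fun m => get_mask_size m == L)).map (fun m => (m, get_mask_sum m))).foldl
          (fun n ms => if q ms then n ||| ms.1 else n) a := by
  induction l generalizing a with
  | nil => rfl
  | cons m xs ih =>
      by_cases hsz : get_mask_size m = L
      · have hsz' : (get_mask_size m == L) = true := by simp [hsz]
        have hfilter : (m :: xs).filter (fun m => get_mask_size m == L)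
            = m :: xs.filter (fun m => get_mask_size m == L) := by
          simp [hsz']
        cases hq : q (m, get_mask_sum m)
        · have h1 : (if (q (m, get_mask_sum m) && (get_mask_size m == L)) = true
              then a ||| m else a) = a := by simp [hq]
          have h2 : (if q (m, get_mask_sum m) = true then a ||| (m, get_mask_sum m).1 else a)
              = a := by simp [hq]
          rw [hfilter]
          simp only [List.map_cons, List.foldl_cons]
          rw [h1, h2]
          exact ih _
        · have h1 : (if (q (m, get_mask_sum m) && (get_mask_size m == L)) = true
              then a ||| m else a) = a ||| m := by simp [hq, hsz']
          have h2 : (if q (m, get_mask_sum m) = true then a ||| (m, get_mask_sum m).1 else a)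
              = a ||| m := by simp [hq]
          rw [hfilter]
          simp only [List.map_cons, List.foldl_cons]
          rw [h1, h2]
          exact ih _
      · have hsz' : (get_mask_size m == L) = false := by simp [hsz]
        have hfilter : (m :: xs).filter (fun m => get_mask_size m == L)
            = xs.filter (fun m => get_mask_size m == L) := by
          simp [hsz']
        have h1 : (if (q (m, get_mask_sum m) && (get_mask_size m == L)) = true
            then a ||| m else a) = a := by simp [hsz']
        rw [hfilter]
        simp only [List.foldl_cons]
        rw [h1]
        exact ih _

-- or-accumulation is right-commutative, so the fold only depends on the list up to permutation
theorem fold_perm (q : Nat × Nat → Bool) {l₁ l₂ : List (Nat × Nat)} (h : l₁.Perm l₂) (a : Nat) :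
    l₁.foldl (fun n ms => if q ms then n ||| ms.1 else n) a
      = l₂.foldl (fun n ms => if q ms then n ||| ms.1 else n) a := by
  exact h.foldl_eq (rcomm := ⟨fun n x y => by
    by_cases hx : q x = true <;> by_cases hy : q y = true <;>
      simp [hx, hy, Nat.lor_assoc, Nat.lor_comm x.1 y.1]⟩) a

-- the Int fold seeded with the literal 0
theorem foldl_bor_cast_zero {α : Type} (l : List α) (c : α → Bool) (g : α → Nat) :
    l.foldl (fun (a : Int) x => if c x then PySem.Int.bor a ((g x : Nat) : Int) else a) 0
      = ((l.foldl (fun (n : Nat) x => if c x then n ||| g x else n) 0 : Nat) : Int) := by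
  have h := foldl_bor_cast l c g 0
  rw [show ((0 : Nat) : Int) = (0 : Int) by simp] at h
  exact h

-- swapping the last two conjuncts of an if-condition
theorem ite_and_rot {α : Type} (x y z : Bool) (a b : α) :
    (if (x && y && z) = true then a else b) = (if (x && z && y) = true then a else b) := by
  cases x <;> cases y <;> cases z <;> rfl

-- the common condition: mask contains `known` and the digit-sum is `_sum`
def qCond (known _sum : Int) : Nat × Nat → Bool :=
  fun ms => (PySem.Int.band (ms.1 : Int) known == known) && ((ms.2 : Int) == _sum)

set_option maxRecDepth 400000 in
theorem get_candidate_nums_spec_aux (_len _sum known : Int) :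
    get_candidate_nums _len _sum known = get_candidate_nums_alt _len _sum known := by
  by_cases hrange : _len < 0 ∨ 9 < _len
  · -- popcount of every even mask < 1024 is ≤ 9, so A's condition never fires
    have hB : get_candidate_nums_alt _len _sum known = 0 := by
      simp only [get_candidate_nums_alt]; rw [if_pos hrange]
    have hA : get_candidate_nums _len _sum known = PySem.Int.band 0 (Int.not known) := by
      simp only [get_candidate_nums]
      rw [pyRange_eq_maskListA, List.foldl_map]
      congr 1
      rw [PySem.List.foldl_congr_mem _ _ (fun (a : Int) (_ : Nat) => a) 0 ?_, foldl_id]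
      intro acc m hm
      have hsz : get_mask_size m ≤ 9 := by
        have := List.all_eq_true.mp maskListA_size_le m hm
        simp at this
        exact this
      have hfalse : (((get_mask_size m : Nat) : Int) == _len) = false := by
        rw [beq_eq_false_iff_ne]
        intro he
        omega
      simp [Int.toNat_natCast, hfalse]
    rw [hA, hB, PySem.Int.band_comm, PySem.Int.band_zero]
  · have h0 : 0 ≤ _len := by omega
    have h9 : _len ≤ 9 := by omega
    set L := _len.toNat with hLdef
    have hlen : _len = (L : Int) := (Int.toNat_of_nonneg h0).symm
    have hL9 : L ≤ 9 := by omega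
    have hA : get_candidate_nums _len _sum known
        = PySem.Int.band
            (((pairsAList L).foldl
                (fun n ms => if qCond known _sum ms then n ||| ms.1 else n) 0 : Nat) : Int)
            (Int.not known) := by
      simp only [get_candidate_nums]
      rw [pyRange_eq_maskListA, List.foldl_map]
      congr 1
      rw [PySem.List.foldl_congr_mem _ _
        (fun (a : Int) (m : Nat) =>
          if (qCond known _sum (m, get_mask_sum m) && (get_mask_size m == L))
          then PySem.Int.bor a ((m : Nat) : Int) else a) 0 ?_]
      · rw [foldl_bor_cast_zero, fold_split]
        simp only [pairsAList]
      · intro acc m hm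
        simp only [Int.toNat_natCast, qCond]
        simp only [hlen, natCast_beq]
        exact ite_and_rot _ _ _ _ _
    have hB : get_candidate_nums_alt _len _sum known
        = PySem.Int.band
            (((combosB 1 L).foldl
                (fun n ms => if qCond known _sum ms then n ||| ms.1 else n) 0 : Nat) : Int)
            (Int.not known) := by
      simp only [get_candidate_nums_alt]
      rw [if_neg (by omega : ¬(_len < 0 ∨ 9 < _len))]
      congr 1
      rw [← hLdef, foldl_bor_cast_zero]
      rw [PySem.List.foldl_congr_mem _ _
        (fun (n : Nat) (ms : Nat × Nat) => if qCond known _sum ms then n ||| ms.1 else n) 0 ?_]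
      intro acc ms _
      simp only [qCond]
      rw [Bool.and_comm]
      rfl
    rw [hA, hB, fold_perm (qCond known _sum) (pairsA_perm_combos L hL9) 0]

-- ===== VERDICT (by name: the statement is the Claim_ definition above) =====
theorem get_candidate_nums_spec : Claim_equal_get_candidate_nums := by
  intro _len _sum known _
  exact get_candidate_nums_spec_aux _len _sum known
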